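-- pv_equiv track=rewrite | github.com/promptdriven/pdd | tests/fixtures/one_session_eval/s7_large_code_bug/src/llm_client.py | strip_excessive_whitespace
-- ===== SOURCE A (Python) =====
-- def strip_excessive_whitespace(text: str) -> str:
--     lines = text.split('\n')
--     cleaned = []
--     blank_count = 0
--     for line in lines:
--         stripped = line.rstrip()
--         if not stripped:
--             blank_count += 1
--             if blank_count <= 2:
--                 cleaned.append('')
--         else:
--             blank_count = 0
--             cleaned.append(stripped)
--     return '\n'.join(cleaned)
-- ===== SOURCE B (Python) =====
-- def strip_excessive_whitespace(text: str) -> str: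
--     def group(ms):
--         if not ms:
--             return []
--         if ms[0]:
--             return [ms[0]] + group(ms[1:])
--         blanks = 1
--         while blanks < len(ms) and not ms[blanks]:
--             blanks += 1
--         return [''] * min(blanks, 2) + group(ms[blanks:])
--     return '\n'.join(group([line.rstrip() for line in text.split('\n')]))
-- ===== Notes on version B (the rewrite author's own statement) =====
-- stated objective: alternative
-- what changed: Replaces the running blank_count counter threaded through a single stateful loop with a stateless run-length decomposition: a recursive grouper that emits non-blank lines one by one and collapses each maximal run of k blank lines to min(k,2) empty strings in one step.
import Mathlib
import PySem

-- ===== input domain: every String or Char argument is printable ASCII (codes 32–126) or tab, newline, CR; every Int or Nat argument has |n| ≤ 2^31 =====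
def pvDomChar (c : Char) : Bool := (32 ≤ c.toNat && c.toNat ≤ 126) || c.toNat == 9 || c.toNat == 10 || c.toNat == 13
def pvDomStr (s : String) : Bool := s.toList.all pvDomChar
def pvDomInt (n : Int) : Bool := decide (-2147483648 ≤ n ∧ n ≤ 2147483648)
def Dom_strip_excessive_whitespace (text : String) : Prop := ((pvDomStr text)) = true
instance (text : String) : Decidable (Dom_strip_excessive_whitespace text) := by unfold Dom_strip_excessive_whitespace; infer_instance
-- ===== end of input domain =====

-- B replaces A's running blank_count counter with a stateless run-length grouping (alternative decomposition, same cost).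

-- ===== PORT A =====
-- A's loop body over the state (cleaned, blank_count)
def pvStepA (st : List String × Nat) (line : String) : List String × Nat :=
  let stripped := PySem.Str.rstrip line
  if stripped = "" then
    let bc := st.2 + 1
    (if bc ≤ 2 then st.1 ++ [""] else st.1, bc)
  else (st.1 ++ [stripped], 0)

def strip_excessive_whitespace (text : String) : String :=
  let lines := (PySem.Str.split? text "\n").getD []   -- split? is none only for sep = ""
  PySem.Str.join "\n" (lines.foldl pvStepA ([], 0)).1

-- ===== PORT B =====
-- recursive grouper: emits a non-blank head, or collapses a maximal blank run of length k to min(k,2) empties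
def pvGroup : List String → List String
  | [] => []
  | m :: ms =>
    if m = "" then
      let blanks := 1 + (ms.takeWhile (fun s => s == "")).length
      List.replicate (min blanks 2) "" ++ pvGroup (ms.dropWhile (fun s => s == ""))
    else m :: pvGroup ms
termination_by l => l.length
decreasing_by
· exact Nat.lt_succ_of_le (List.length_dropWhile_le _ _)
· simp

def strip_excessive_whitespace_alt (text : String) : String :=
  PySem.Str.join "\n" (pvGroup (((PySem.Str.split? text "\n").getD []).map PySem.Str.rstrip))

-- ===== PRECONDITION & SPEC =====
def Spec_strip_excessive_whitespace (text : String) (out : String) : Prop := out = strip_excessive_whitespace_alt text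
instance (text : String) (out : String) : Decidable (Spec_strip_excessive_whitespace text out) := by unfold Spec_strip_excessive_whitespace; infer_instance

-- ===== CLAIM (what is proved, stated in full; the proofs are below) =====
def Claim_equal_strip_excessive_whitespace : Prop := ∀ (text : String), Dom_strip_excessive_whitespace text → Spec_strip_excessive_whitespace text (strip_excessive_whitespace text)

-- ===== LEMMAS AND PROOFS =====

-- A's fold, in list-producing form over the already-rstripped lines
def pvFA (bc : Nat) : List String → List String
  | [] => []
  | m :: ms =>
    if m = "" then (if bc + 1 ≤ 2 then [""] else []) ++ pvFA (bc + 1) ms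
    else m :: pvFA 0 ms

theorem pvFoldl_eq_pvFA (ls : List String) : ∀ (acc : List String) (bc : Nat),
    (ls.foldl pvStepA (acc, bc)).1 = acc ++ pvFA bc (ls.map PySem.Str.rstrip) := by
  induction ls with
  | nil => intro acc bc; simp [pvFA]
  | cons l ls ih =>
    intro acc bc
    rw [List.foldl_cons, List.map_cons]
    by_cases h : PySem.Str.rstrip l = ""
    · by_cases h2 : bc + 1 ≤ 2
      · have hs : pvStepA (acc, bc) l = (acc ++ [""], bc + 1) := by simp [pvStepA, h, h2]
        rw [hs, ih]
        simp [pvFA, h, h2]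
      · have hs : pvStepA (acc, bc) l = (acc, bc + 1) := by simp [pvStepA, h, h2]
        rw [hs, ih]
        simp [pvFA, h, h2]
    · have hs : pvStepA (acc, bc) l = (acc ++ [PySem.Str.rstrip l], 0) := by simp [pvStepA, h]
      rw [hs, ih]
      simp [pvFA, h]

theorem pvFA_replicate (k : Nat) : ∀ (bc : Nat) (rest : List String),
    pvFA bc (List.replicate k "" ++ rest)
      = List.replicate (min (bc + k) 2 - min bc 2) "" ++ pvFA (bc + k) rest := by
  induction k with
  | zero => intro bc rest; simp
  | succ k ih =>
    intro bc rest
    rw [List.replicate_succ, List.cons_append]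
    have hstep : pvFA bc ("" :: (List.replicate k "" ++ rest))
        = (if bc + 1 ≤ 2 then [""] else []) ++ pvFA (bc + 1) (List.replicate k "" ++ rest) := by
      simp [pvFA]
    rw [hstep, ih (bc + 1) rest]
    have h1 : bc + 1 + k = bc + (k + 1) := by omega
    rw [h1]
    by_cases h2 : bc + 1 ≤ 2
    · rw [if_pos h2]
      have h3 : min (bc + (k + 1)) 2 - min bc 2
          = (min (bc + (k + 1)) 2 - min (bc + 1) 2) + 1 := by omega
      rw [h3, List.replicate_succ, List.cons_append]
      simp
    · rw [if_neg h2, List.nil_append]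
      have h3 : min (bc + (k + 1)) 2 - min (bc + 1) 2 = min (bc + (k + 1)) 2 - min bc 2 := by
        omega
      rw [h3]

theorem pvFA_reset (bc : Nat) (ms : List String)
    (h : ms = [] ∨ ∃ m rest, ms = m :: rest ∧ m ≠ "") : pvFA bc ms = pvFA 0 ms := by
  rcases h with h | ⟨m, rest, rfl, hm⟩
  · subst h; rfl
  · simp [pvFA, hm]

theorem pvFA_eq_pvGroup (ms : List String) : pvFA 0 ms = pvGroup ms := by
  induction hn : ms.length using Nat.strong_induction_on generalizing ms with
  | _ n ih =>
    match ms with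
    | [] => simp [pvFA, pvGroup]
    | m :: rest =>
      have hn' : rest.length + 1 = n := by simpa using hn
      by_cases hm : m = ""
      · subst hm
        set t := rest.takeWhile (fun s => s == "") with ht
        set d := rest.dropWhile (fun s => s == "") with hd
        have hrest : rest = t ++ d := (List.takeWhile_append_dropWhile).symm
        have htrep : t = List.replicate t.length "" := by
          apply List.eq_replicate_of_mem
          intro b hb
          have := List.mem_takeWhile_imp hb
          simpa using this
        have hdhead : d = [] ∨ ∃ x xs, d = x :: xs ∧ x ≠ "" := by
          cases hdc : d with
          | nil => exact Or.inl rfl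
          | cons x xs =>
            right
            refine ⟨x, xs, rfl, ?_⟩
            have hx : ¬ ((fun s => s == "") x = true) := by
              have := List.head?_dropWhile_not (fun s => s == "") rest
              rw [← hd, hdc] at this
              simpa using this
            simpa using hx
        have hms : ("" :: rest) = List.replicate (1 + t.length) "" ++ d := by
          conv_lhs => rw [hrest, htrep]
          simp [Nat.add_comm 1 t.length, List.replicate_succ]
        have hlen : d.length < n := by
          have : d.length ≤ rest.length := List.length_dropWhile_le _ _
          omega
        have h02 : min (0 + (1 + t.length)) 2 - min 0 2 = min (1 + t.length) 2 := by omega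
        have hL : pvFA 0 ("" :: rest)
            = List.replicate (min (1 + t.length) 2) "" ++ pvFA 0 d := by
          rw [hms, pvFA_replicate, pvFA_reset _ _ hdhead, h02]
        have hR : pvGroup ("" :: rest)
            = List.replicate (min (1 + t.length) 2) "" ++ pvGroup d := by
          rw [pvGroup.eq_def]
          simp
          rw [← ht, ← hd]
        rw [hL, hR, ih d.length hlen d rfl]
      · simp only [pvGroup, pvFA, if_neg hm]
        rw [ih rest.length (by omega) rest rfl]

-- ===== VERDICT (by name: the statement is the Claim_ definition above) =====
theorem strip_excessive_whitespace_spec : Claim_equal_strip_excessive_whitespace := by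
  intro text _
  show PySem.Str.join "\n" (List.foldl pvStepA ([], 0) ((PySem.Str.split? text "\n").getD [])).1
      = PySem.Str.join "\n" (pvGroup (((PySem.Str.split? text "\n").getD []).map PySem.Str.rstrip))
  rw [pvFoldl_eq_pvFA, List.nil_append, pvFA_eq_pvGroup]
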